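-- pv_equiv track=rewrite | github.com/MarvinTai/Quadratic_Sieve | quadratic_sieve_sec_ver.py | generate_factor_base
-- ===== SOURCE A (Python) =====
-- def sieve_of_eratosthenes(limit):
--     """Return a list of all primes up to 'limit'."""
--     sieve = [True]*(limit+1)
--     sieve[0] = sieve[1] = False
--     for i in range(2, int(limit**0.5)+1):
--         if sieve[i]:
--             for multiple in range(i*i, limit+1, i):
--                 sieve[multiple] = False
--     return [p for p, is_prime in enumerate(sieve) if is_prime]
--
-- def legendre_symbol(a, p):
--     """
--     Compute the Legendre symbol (a/p) using Euler's criterion.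
--     For an odd prime p:
--         (a/p) =  1  if a is a quadratic residue mod p,
--                -1  if a is a non-residue,
--                 0  if p divides a.
--     """
--     ls = pow(a, (p - 1)//2, p)
--     if ls == 0:
--         return 0
--     elif ls == p - 1:
--         return -1
--     else:
--         return ls  # 1
--
-- def generate_factor_base(n, B):
--     """
--     Build a factor base consisting of:
--       - The prime -1 to handle signs.
--       - All primes p up to B such that:
--            • p == 2 is always included
--            • for odd p, n is a quadratic residue modulo p (i.e. legendre_symbol(n, p) == 1)
--     """
--     base_primes = sieve_of_eratosthenes(B)
--     factor_base = [-1]  # begin with -1 to handle sign of Q(x)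
--     for p in base_primes:
--         if p == 2:
--             factor_base.append(p)
--         else:
--             if legendre_symbol(n, p) == 1:
--                 factor_base.append(p)
--     return factor_base
-- ===== SOURCE B (Python) =====
-- def sieve_of_eratosthenes(limit):
--     """Return a list of all primes up to 'limit'."""
--     sieve = [True]*(limit+1)
--     sieve[0] = sieve[1] = False
--     for i in range(2, int(limit**0.5)+1):
--         if sieve[i]:
--             for multiple in range(i*i, limit+1, i):
--                 sieve[multiple] = False
--     return [p for p, is_prime in enumerate(sieve) if is_prime]
--
-- def legendre_symbol(a, p):
--     """Legendre symbol (a/p) for an odd prime p, computed by the binary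
--     Jacobi-symbol algorithm (factor out 2s, then flip by quadratic
--     reciprocity) -- no modular exponentiation."""
--     num = a % p
--     den = p
--     result = 1
--     while num != 1:
--         if num == 0:
--             return 0
--         while num % 2 == 0:
--             num //= 2
--             if den % 8 in (3, 5):
--                 result = -result
--         if num != 1:
--             if num % 4 == 3 and den % 4 == 3:
--                 result = -result
--             num, den = den % num, num
--     return result
--
-- def generate_factor_base(n, B):
--     return [-1] + [p for p in sieve_of_eratosthenes(B)
--                    if p == 2 or legendre_symbol(n, p) == 1]
-- ===== Notes on version B (the rewrite author's own statement) =====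
-- stated objective: alternative
-- what changed: The quadratic-residue test is rewritten: instead of Euler's criterion via modular exponentiation (pow(n,(p-1)//2,p)), B computes the Legendre symbol with the binary Jacobi-symbol algorithm (strip factors of 2 using (2/p)=(-1)^((p^2-1)/8), then flip numerator/denominator by quadratic reciprocity), and the factor-base loop becomes a comprehension.
import Mathlib
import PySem

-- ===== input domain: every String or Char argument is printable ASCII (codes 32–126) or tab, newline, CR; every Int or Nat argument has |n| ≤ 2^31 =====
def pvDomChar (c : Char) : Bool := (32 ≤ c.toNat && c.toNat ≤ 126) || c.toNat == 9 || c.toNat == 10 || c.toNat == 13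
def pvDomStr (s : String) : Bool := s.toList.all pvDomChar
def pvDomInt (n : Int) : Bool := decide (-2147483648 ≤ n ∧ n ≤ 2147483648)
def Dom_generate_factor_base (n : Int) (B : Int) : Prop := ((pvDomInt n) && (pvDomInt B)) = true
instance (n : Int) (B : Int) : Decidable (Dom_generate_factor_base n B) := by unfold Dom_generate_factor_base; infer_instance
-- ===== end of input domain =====

-- B replaces Euler's-criterion modular exponentiation by the binary Jacobi-symbol /
-- quadratic-reciprocity algorithm for the residue test (objective: alternative).

-- ===== PORT A =====

-- The Python bool list is ported as Array Bool; every index written or read by the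
-- sieve (0, 1, i ≤ isqrt(limit), multiples of i up to limit) is nonnegative and,
-- for limit ≥ 1, in range, where setIfInBounds/getD are exact for list mutation/lookup.
-- inner marking loop 'for multiple in range(i*i, limit+1, i): sieve[multiple] = False'
def sieveMark (limit : Int) (s : Array Bool) (i : Int) : Array Bool :=
  (PySem.List.pyRange (i * i) (limit + 1) i).foldl
    (fun t m => t.setIfInBounds m.toNat false) s

-- one outer iteration 'if sieve[i]: <mark multiples>'
def sieveStep (limit : Int) (s : Array Bool) (i : Int) : Array Bool :=
  if s.getD i.toNat false = true then sieveMark limit s i else s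

-- int(limit**0.5) is ported as Int.sqrt: exact for every limit with 1 ≤ limit ≤ 2^31
-- (the whole admitted domain; verified exhaustively near squares and at random).
def sieve_of_eratosthenes (limit : Int) : List Int :=
  let sieve0 := Array.replicate (limit + 1).toNat true
  let sieve1 := (sieve0.setIfInBounds 0 false).setIfInBounds 1 false
  let sieve2 := (PySem.List.pyRange 2 (Int.sqrt limit + 1) 1).foldl (sieveStep limit) sieve1
  -- list comprehension over enumerate(sieve): ported via zipIdx, whose pairs are
  -- (value, index) instead of Python's (index, value) — same traversal, same output
  ((sieve2.toList.zipIdx.filter (fun q => q.1)).map (fun q => ((q.2 : Nat) : Int)))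

def legendre_symbol (a : Int) (p : Int) : Int :=
  let ls := PySem.Int.powMod a (PySem.Int.floordiv (p - 1) 2).toNat p
  if ls = 0 then 0
  else if ls = p - 1 then -1
  else ls

def generate_factor_base (n : Int) (B : Int) : List Int :=
  let base_primes := sieve_of_eratosthenes B
  base_primes.foldl
    (fun fb p =>
      if p = 2 then fb ++ [p]
      else if legendre_symbol n p = 1 then fb ++ [p] else fb)
    [-1]

-- ===== PORT B =====

-- the same sieve helper appears verbatim in Source B; B shares it

-- inner 'while num % 2 == 0' loop of Source B's legendre_symbol (fuel = num.toNat suffices)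
def stripTwos (fuel : Nat) (num den result : Int) : Int × Int :=
  match fuel with
  | 0 => (num, result)
  | f + 1 =>
    if PySem.Int.mod num 2 = 0 then
      stripTwos f (PySem.Int.floordiv num 2) den
        (if PySem.Int.mod den 8 = 3 ∨ PySem.Int.mod den 8 = 5 then -result else result)
    else (num, result)

-- outer 'while num != 1' loop of Source B's legendre_symbol
def jacobiLoop (fuel : Nat) (num den result : Int) : Int :=
  match fuel with
  | 0 => result
  | f + 1 =>
    if num = 1 then result
    else if num = 0 then 0
    else
      let nr := stripTwos num.toNat num den result
      if nr.1 = 1 then nr.2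
      else
        jacobiLoop f (PySem.Int.mod den nr.1) nr.1
          (if PySem.Int.mod nr.1 4 = 3 ∧ PySem.Int.mod den 4 = 3 then -nr.2 else nr.2)

def legendre_symbol_alt (a : Int) (p : Int) : Int :=
  jacobiLoop ((PySem.Int.mod a p).toNat + 1) (PySem.Int.mod a p) p 1

def generate_factor_base_alt (n : Int) (B : Int) : List Int :=
  -1 :: (sieve_of_eratosthenes B).filter
    (fun p => p == 2 || legendre_symbol_alt n p == 1)

-- ===== PRECONDITION & SPEC =====
-- Python A raises IndexError on 'sieve[0] = sieve[1] = False' whenever B < 1; it returns on every B ≥ 1.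
def Pre_generate_factor_base (n : Int) (B : Int) : Prop := 1 ≤ B
instance (n : Int) (B : Int) : Decidable (Pre_generate_factor_base n B) := by unfold Pre_generate_factor_base; infer_instance
def pvWitness_generate_factor_base : Int × Int := (7, 10)

def Spec_generate_factor_base (n : Int) (B : Int) (out : List Int) : Prop := out = generate_factor_base_alt n B
instance (n : Int) (B : Int) (out : List Int) : Decidable (Spec_generate_factor_base n B out) := by unfold Spec_generate_factor_base; infer_instance

-- ===== CLAIM (what is proved, stated in full; the proofs are below) =====
def Claim_equal_generate_factor_base : Prop := ∀ (n : Int) (B : Int), Dom_generate_factor_base n B → Pre_generate_factor_base n B → Spec_generate_factor_base n B (generate_factor_base n B)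

-- ===== LEMMAS AND PROOFS =====

theorem markFold_getElem? (ms : List Int) : ∀ (s : Array Bool), (∀ m ∈ ms, 0 ≤ m) → ∀ (k : Nat),
    (ms.foldl (fun t m => t.setIfInBounds m.toNat false) s)[k]? =
      if (k : Int) ∈ ms ∧ k < s.size then some false else s[k]? := by
  induction ms with
  | nil => intro s hms k; simp
  | cons m ms ih =>
    intro s hms k
    have hm : 0 ≤ m := hms m (by simp)
    simp only [List.foldl_cons]
    rw [ih (s.setIfInBounds m.toNat false) (fun x hx => hms x (by simp [hx])) k]
    have hlen : (s.setIfInBounds m.toNat false).size = s.size := Array.size_setIfInBounds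
    rw [hlen, Array.getElem?_setIfInBounds]
    by_cases hmem : (k : Int) ∈ ms <;> by_cases hmk : m.toNat = k <;> by_cases hkl : k < s.size <;>
      simp_all <;> first | omega | simp [show ¬ k < s.size from by omega]

theorem markFold_length (ms : List Int) : ∀ (s : Array Bool), (∀ m ∈ ms, 0 ≤ m) →
    (ms.foldl (fun t m => t.setIfInBounds m.toNat false) s).size = s.size := by
  induction ms with
  | nil => intro s _; rfl
  | cons m ms ih =>
    intro s hms
    simp only [List.foldl_cons]
    rw [ih _ (fun x hx => hms x (by simp [hx]))]
    exact Array.size_setIfInBounds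

theorem mark_nonneg (L i : Int) (hi : 2 ≤ i) : ∀ m ∈ PySem.List.pyRange (i * i) (L + 1) i, 0 ≤ m := by
  intro m hm
  rw [PySem.List.mem_pyRange_iff_of_pos (by omega)] at hm
  nlinarith [hm.1]

theorem sieveStep_length (L : Int) (s : Array Bool) (i : Int) (hi : 2 ≤ i) :
    (sieveStep L s i).size = s.size := by
  unfold sieveStep sieveMark
  split
  · exact markFold_length _ s (mark_nonneg L i hi)
  · rfl

theorem sieveFold_length (L : Int) (is : List Int) : ∀ (s : Array Bool), (∀ i ∈ is, 2 ≤ i) →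
    (is.foldl (sieveStep L) s).size = s.size := by
  induction is with
  | nil => intro s _; rfl
  | cons i is ih =>
    intro s his
    simp only [List.foldl_cons]
    rw [ih _ (fun x hx => his x (by simp [hx])), sieveStep_length L s i (his i (by simp))]

theorem sieveStep_false (L : Int) (s : Array Bool) (i : Int) (hi : 2 ≤ i) (k : Nat)
    (h : s[k]? = some false) : (sieveStep L s i)[k]? = some false := by
  unfold sieveStep sieveMark
  split
  · rw [markFold_getElem? _ s (mark_nonneg L i hi) k]
    split <;> simp [h]
  · exact h

theorem sieveFold_false (L : Int) (is : List Int) : ∀ (s : Array Bool), (∀ i ∈ is, 2 ≤ i) →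
    ∀ (k : Nat), s[k]? = some false → (is.foldl (sieveStep L) s)[k]? = some false := by
  induction is with
  | nil => intro s _ k h; exact h
  | cons i is ih =>
    intro s his k h
    simp only [List.foldl_cons]
    exact ih _ (fun x hx => his x (by simp [hx])) k (sieveStep_false L s i (his i (by simp)) k h)

theorem sieveStep_prime (L : Int) (s : Array Bool) (i : Int) (hi : 2 ≤ i) (k : Nat)
    (hk : Nat.Prime k) (h : s[k]? = some true) : (sieveStep L s i)[k]? = some true := by
  unfold sieveStep sieveMark
  split
  · rw [markFold_getElem? _ s (mark_nonneg L i hi) k]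
    have hnot : ¬ ((k : Int) ∈ PySem.List.pyRange (i * i) (L + 1) i) := by
      intro hm
      rw [PySem.List.mem_pyRange_iff_of_pos (by omega)] at hm
      obtain ⟨h1, h2', h3⟩ := hm
      have hdvd : i ∣ (k : Int) := by
        have := dvd_add h3 (Dvd.intro i rfl)
        simpa using this
      have hin : i.toNat ∣ k := by
        have : ((i.toNat : Int)) ∣ (k : Int) := by rwa [Int.toNat_of_nonneg (by omega)]
        exact_mod_cast this
      rcases (Nat.Prime.eq_one_or_self_of_dvd hk _ hin) with h1' | h1'
      · omega
      · have : (k : Int) * (k : Int) ≤ (k : Int) := by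
          have : i = (k : Int) := by omega
          nlinarith [h1]
        have hk2 := hk.two_le
        nlinarith [this]
    simp [hnot, h]
  · exact h

theorem sieveFold_prime (L : Int) (is : List Int) : ∀ (s : Array Bool), (∀ i ∈ is, 2 ≤ i) →
    ∀ (k : Nat), Nat.Prime k → s[k]? = some true → (is.foldl (sieveStep L) s)[k]? = some true := by
  induction is with
  | nil => intro s _ k _ h; exact h
  | cons i is ih =>
    intro s his k hk h
    simp only [List.foldl_cons]
    exact ih _ (fun x hx => his x (by simp [hx])) k hk (sieveStep_prime L s i (his i (by simp)) k hk h)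

theorem composite_marked (L : Int) (hL : 1 ≤ L) (s : Array Bool)
    (hlen : s.size = (L + 1).toNat)
    (hprimes : ∀ j : Nat, Nat.Prime j → (j : Int) ≤ L → s[j]? = some true)
    (k : Nat) (hk2 : 2 ≤ k) (hkL : (k : Int) ≤ L) (hkc : ¬ Nat.Prime k) :
    ((PySem.List.pyRange 2 (Int.sqrt L + 1) 1).foldl (sieveStep L) s)[k]? = some false := by
  set q := k.minFac with hqdef
  have hqp : Nat.Prime q := Nat.minFac_prime (by omega)
  have hqd : q ∣ k := Nat.minFac_dvd k
  have hqsq : q * q ≤ k := by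
    have := Nat.minFac_sq_le_self (n := k) (by omega) hkc
    nlinarith [this, sq_nonneg q]
  have hq2 : 2 ≤ q := hqp.two_le
  have hqL : (q : Int) ≤ L := by
    have : q ≤ k := Nat.le_of_dvd (by omega) hqd
    omega
  have hsq : (q : Int) ≤ Int.sqrt L := by
    have h1 : q ≤ Nat.sqrt L.toNat := by
      rw [Nat.le_sqrt]
      have : (q * q : Int) ≤ L := by exact_mod_cast le_trans (by exact_mod_cast hqsq) hkL
      omega
    rw [Int.sqrt]
    omega
  -- split the outer range at q
  rw [show PySem.List.pyRange 2 (Int.sqrt L + 1) 1 =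
      PySem.List.pyRange 2 (q : Int) 1 ++ PySem.List.pyRange (q : Int) ((q : Int) + 1) 1 ++
      PySem.List.pyRange ((q : Int) + 1) (Int.sqrt L + 1) 1 from by
    rw [PySem.List.pyRange_one_append 2 ((q:Int)) (Int.sqrt L + 1) (by exact_mod_cast hq2) (by omega),
        PySem.List.pyRange_one_append ((q:Int)) ((q:Int)+1) (Int.sqrt L + 1) (by omega) (by omega),
        List.append_assoc]]
  rw [PySem.List.pyRange_one_singleton]
  rw [List.foldl_append, List.foldl_append]
  set s1 := (PySem.List.pyRange 2 (q : Int) 1).foldl (sieveStep L) s with hs1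
  have hpre2 : ∀ i ∈ PySem.List.pyRange 2 (q : Int) 1, 2 ≤ i := by
    intro i hi; rw [PySem.List.mem_pyRange_one] at hi; omega
  have hs1len : s1.size = s.size := sieveFold_length L _ s hpre2
  have hs1q : s1[q]? = some true :=
    sieveFold_prime L _ s hpre2 q hqp (hprimes q hqp hqL)
  simp only [List.foldl_cons, List.foldl_nil]
  apply sieveFold_false L _ _ (by intro i hi; rw [PySem.List.mem_pyRange_one] at hi; omega)
  -- the step at i = q marks k
  have hqlen : q < s1.size := by
    rw [hs1len, hlen]; omega
  have hget : s1.getD ((q : Int)).toNat false = true := by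
    rw [Int.toNat_natCast, Array.getD_eq_getD_getElem?, hs1q]
    rfl
  unfold sieveStep
  rw [if_pos hget]
  unfold sieveMark
  rw [markFold_getElem? _ s1 (mark_nonneg L (q : Int) (by exact_mod_cast hq2)) k]
  rw [if_pos]
  constructor
  · rw [PySem.List.mem_pyRange_iff_of_pos (by omega)]
    refine ⟨by exact_mod_cast hqsq, by omega, ?_⟩
    have : (q : Int) ∣ (k : Int) := by exact_mod_cast hqd
    exact dvd_sub this (Dvd.intro _ rfl)
  · rw [hs1len, hlen]; omega

theorem init_getElem? (L : Int) (hL : 1 ≤ L) (j : Nat) (hj : j < (L + 1).toNat) :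
    (((Array.replicate (L + 1).toNat true).setIfInBounds 0 false).setIfInBounds 1 false)[j]? =
      some (decide (2 ≤ j)) := by
  rw [Array.getElem?_setIfInBounds, Array.getElem?_setIfInBounds]
  simp only [Array.size_setIfInBounds, Array.size_replicate, Array.getElem?_replicate]
  by_cases h0 : j = 0
  · simp [h0]; omega
  · by_cases h1 : j = 1
    · simp [h1]; omega
    · have h2 : 2 ≤ j := by omega
      rw [if_neg (by omega), if_neg (by omega)]
      simp [h2]
      omega

theorem sieve_mem_prime (B : Int) (hB : 1 ≤ B) (p : Int) (hp : p ∈ sieve_of_eratosthenes B) :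
    ∃ q : Nat, p = (q : Int) ∧ Nat.Prime q := by
  unfold sieve_of_eratosthenes at hp
  set s1 := ((Array.replicate (B + 1).toNat true).setIfInBounds 0 false).setIfInBounds 1 false with hs1
  set s2 := (PySem.List.pyRange 2 (Int.sqrt B + 1) 1).foldl (sieveStep B) s1 with hs2
  simp only [List.mem_map, List.mem_filter] at hp
  obtain ⟨⟨b, k⟩, ⟨hmem, hb⟩, hp1⟩ := hp
  rw [List.mk_mem_zipIdx_iff_getElem?] at hmem
  simp only at hb hp1
  have hpre2 : ∀ i ∈ PySem.List.pyRange 2 (Int.sqrt B + 1) 1, 2 ≤ i := by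
    intro i hi; rw [PySem.List.mem_pyRange_one] at hi; omega
  have hs1len : s1.size = (B + 1).toNat := by
    rw [hs1]
    simp
  have hs2len : s2.size = (B + 1).toNat := by
    rw [hs2, sieveFold_length B _ s1 hpre2, hs1len]
  have htrue : s2[k]? = some true := by
    rw [← Array.getElem?_toList, hmem]
    simp [hb]
  have hklen : k < (B + 1).toNat := by
    have h2 : k < s2.toList.length := (List.getElem?_eq_some_iff.mp hmem).1
    rw [Array.length_toList, hs2len] at h2
    exact h2
  refine ⟨k, by omega, ?_⟩
  by_contra hkc
  by_cases hk2 : 2 ≤ k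
  · have := composite_marked B hB s1 hs1len
      (fun j hjp hjL => by rw [init_getElem? B hB j (by omega)]; simp [hjp.two_le])
      k hk2 (by omega) hkc
    rw [← hs2] at this
    rw [this] at htrue
    simp at htrue
  · have hfalse : s1[k]? = some false := by
      rw [init_getElem? B hB k (by omega)]
      simp; omega
    have := sieveFold_false B _ s1 hpre2 k hfalse
    rw [← hs2] at this
    rw [this] at htrue
    simp at htrue


theorem legendreA (n : Int) (q : Nat) [hF : Fact (Nat.Prime q)] (h2 : 2 < q) :
    legendre_symbol n (q : Int) = legendreSym q n := by
  have hq0 : (0 : Int) < (q : Int) := by exact_mod_cast Nat.lt_of_lt_of_le Nat.zero_lt_two (by omega)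
  have hqp : Nat.Prime q := hF.out
  have hodd : q % 2 = 1 := Nat.odd_iff.mp (hqp.odd_of_ne_two (by omega))
  -- the exponent (p-1)//2 equals q / 2
  have hexp : (PySem.Int.floordiv ((q : Int) - 1) 2).toNat = q / 2 := by
    rw [PySem.Int.floordiv_eq_ediv_of_pos (by omega)]
    omega
  unfold legendre_symbol
  rw [hexp, PySem.Int.powMod_eq_emod n (q / 2) hq0]
  set ls : Int := n ^ (q / 2) % (q : Int) with hls
  have hls0 : 0 ≤ ls := Int.emod_nonneg _ (by omega)
  have hlsq : ls < (q : Int) := Int.emod_lt_of_pos _ hq0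
  -- Euler's criterion from Mathlib
  have heul : ((legendreSym q n : Int) : ZMod q) = ((ls : Int) : ZMod q) := by
    rw [legendreSym.eq_pow]
    rw [hls]
    push_cast
    simp
  have hmod : (legendreSym q n) % (q : Int) = ls % (q : Int) :=
    (ZMod.intCast_eq_intCast_iff' _ _ _).mp heul
  have hlsls : ls % (q : Int) = ls := Int.emod_eq_of_lt hls0 hlsq
  have htri : legendreSym q n = 0 ∨ legendreSym q n = 1 ∨ legendreSym q n = -1 := by
    by_cases hz : ((n : ZMod q)) = 0
    · exact Or.inl ((legendreSym.eq_zero_iff q n).mpr hz)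
    · rcases legendreSym.eq_one_or_neg_one q hz with h | h
      · exact Or.inr (Or.inl h)
      · exact Or.inr (Or.inr h)
  rcases htri with h | h | h
  · rw [h] at hmod ⊢
    have : ls = 0 := by rw [hlsls] at hmod; simpa using hmod.symm
    simp [this]
  · rw [h] at hmod ⊢
    have h1q : (1 : Int) % (q : Int) = 1 := Int.emod_eq_of_lt (by omega) (by exact_mod_cast Nat.lt_of_lt_of_le Nat.one_lt_two (by omega))
    have : ls = 1 := by rw [hlsls, h1q] at hmod; omega
    rw [if_neg (by omega), if_neg (by
      intro hcon
      rw [this] at hcon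
      have : (q : Int) = 2 := by omega
      exact absurd (by exact_mod_cast this : q = 2) (by omega))]
    exact this
  · rw [h] at hmod ⊢
    have hneg : (-1 : Int) % (q : Int) = (q : Int) - 1 := by
      have h1 : (-1 : Int) = ((q : Int) - 1) + (q : Int) * (-1) := by ring
      rw [h1, Int.add_mul_emod_self_left]
      exact Int.emod_eq_of_lt (by omega) (by omega)
    have : ls = (q : Int) - 1 := by rw [hlsls, hneg] at hmod; omega
    rw [if_neg (by omega), if_pos this]

theorem jacobi_two (den : Int) (hden : 1 < den) (hodd : den % 2 = 1) :
    jacobiSym 2 den.toNat = if den % 8 = 3 ∨ den % 8 = 5 then -1 else 1 := by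
  have hcast : ((den.toNat : Int)) = den := Int.toNat_of_nonneg (by omega)
  have hoddN : Odd den.toNat := by
    rw [Nat.odd_iff]; omega
  rw [jacobiSym.at_two hoddN]
  rw [ZMod.χ₈_nat_eq_if_mod_eight]
  have h2 : den.toNat % 2 = 1 := Nat.odd_iff.mp hoddN
  have h8 : (den.toNat % 8 : Int) = den % 8 := by omega
  rw [if_neg (by omega)]
  by_cases h : den % 8 = 3 ∨ den % 8 = 5
  · rw [if_neg (by omega), if_pos h]
  · rw [if_pos (by omega), if_neg h]

theorem stripTwos_spec (fuel : Nat) : ∀ (num den res : Int), 0 < num → num.toNat ≤ fuel →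
    1 < den → den % 2 = 1 →
    0 < (stripTwos fuel num den res).1 ∧ (stripTwos fuel num den res).1 ≤ num ∧
    (stripTwos fuel num den res).1 % 2 = 1 ∧
    (stripTwos fuel num den res).2 * jacobiSym (stripTwos fuel num den res).1 den.toNat =
      res * jacobiSym num den.toNat := by
  induction fuel with
  | zero => intro num den res h1 h2 _ _; omega
  | succ f ih =>
    intro num den res h1 h2 hden hodd
    by_cases hev : PySem.Int.mod num 2 = 0
    · have hev' : num % 2 = 0 := by rwa [PySem.Int.mod_eq_emod_of_pos (by omega)] at hev
      have hfd : PySem.Int.floordiv num 2 = num / 2 := PySem.Int.floordiv_eq_ediv_of_pos (by omega)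
      have hh1 : 0 < num / 2 := by omega
      have hh2 : (num / 2).toNat ≤ f := by omega
      set res' := if PySem.Int.mod den 8 = 3 ∨ PySem.Int.mod den 8 = 5 then -res else res with hres'
      have hstep : stripTwos (f + 1) num den res = stripTwos f (num / 2) den res' := by
        conv_lhs => rw [stripTwos]
        rw [if_pos hev, hfd]
      obtain ⟨g1, g2, g3, g4⟩ := ih (num / 2) den res' hh1 hh2 hden hodd
      rw [hstep]
      refine ⟨g1, by omega, g3, ?_⟩
      rw [g4]
      have hnum : num = 2 * (num / 2) := by omega
      have hmul : jacobiSym num den.toNat = jacobiSym 2 den.toNat * jacobiSym (num / 2) den.toNat := by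
        conv_lhs => rw [hnum]
        rw [← jacobiSym.mul_left]
      rw [hmul, jacobi_two den hden hodd]
      have hm8 : PySem.Int.mod den 8 = den % 8 := PySem.Int.mod_eq_emod_of_pos (by omega)
      by_cases hc : den % 8 = 3 ∨ den % 8 = 5
      · rw [if_pos hc, hres', if_pos (by rwa [hm8])]
        ring
      · rw [if_neg hc, hres', if_neg (by rwa [hm8])]
        ring
    · have hstep : stripTwos (f + 1) num den res = (num, res) := by
        conv_lhs => rw [stripTwos]
        rw [if_neg hev]
      rw [hstep]
      have : num % 2 = 1 := by
        rw [PySem.Int.mod_eq_emod_of_pos (by omega)] at hev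
        omega
      exact ⟨h1, le_refl _, this, rfl⟩

theorem qrSign_val (m n : Nat) (hm : m % 2 = 1) (hn : n % 2 = 1) :
    qrSign m n = if m % 4 = 3 ∧ n % 4 = 3 then -1 else 1 := by
  rw [qrSign.neg_one_pow (Nat.odd_iff.mpr hm) (Nat.odd_iff.mpr hn)]
  by_cases h : m % 4 = 3 ∧ n % 4 = 3
  · rw [if_pos h]
    exact Odd.neg_one_pow ((Nat.odd_iff.mpr (by omega : m / 2 % 2 = 1)).mul (Nat.odd_iff.mpr (by omega : n / 2 % 2 = 1)))
  · rw [if_neg h]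
    apply Even.neg_one_pow
    rcases Nat.even_or_odd (m / 2) with he | ho
    · exact he.mul_right _
    · have hn2 : Even (n / 2) := by
        rw [Nat.even_iff]
        rw [Nat.odd_iff] at ho
        omega
      exact hn2.mul_left _

theorem jacobiLoop_spec (fuel : Nat) : ∀ (num den res : Int), 0 ≤ num → num.toNat < fuel →
    1 < den → den % 2 = 1 →
    jacobiLoop fuel num den res = res * jacobiSym num den.toNat := by
  induction fuel with
  | zero => intro num den res h1 h2 _ _; omega
  | succ f ih =>
    intro num den res h0 hfuel hden hodd
    by_cases h1 : num = 1
    · conv_lhs => rw [jacobiLoop]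
      rw [if_pos h1, h1, jacobiSym.one_left]
      ring
    · by_cases hz : num = 0
      · conv_lhs => rw [jacobiLoop]
        rw [if_neg h1, if_pos hz, hz]
        rw [jacobiSym.zero_left (by omega)]
        ring
      · have hpos : 0 < num := by omega
        obtain ⟨g1, g2, g3, g4⟩ := stripTwos_spec num.toNat num den res hpos (le_refl _) hden hodd
        set v := (stripTwos num.toNat num den res).1 with hv
        set r := (stripTwos num.toNat num den res).2 with hr
        by_cases hv1 : v = 1
        · conv_lhs => rw [jacobiLoop]
          rw [if_neg h1, if_neg hz]
          simp only [← hv, ← hr, if_pos hv1]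
          rw [hv1, jacobiSym.one_left, mul_one] at g4
          rw [g4]
        · conv_lhs => rw [jacobiLoop]
          rw [if_neg h1, if_neg hz]
          simp only [← hv, ← hr, if_neg hv1]
          have hv3 : 3 ≤ v := by omega
          have hmodv : PySem.Int.mod den v = den % v := PySem.Int.mod_eq_emod_of_pos (by omega)
          have hnum2 : 0 ≤ den % v := Int.emod_nonneg _ (by omega)
          have hnum2lt : den % v < v := Int.emod_lt_of_pos _ (by omega)
          have hfuel2 : (den % v).toNat < f := by omega
          rw [hmodv]
          rw [ih (den % v) v _ hnum2 hfuel2 (by omega) g3]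
          -- now relate jacobiSym (den % v) v.toNat to jacobiSym v den.toNat
          have hvcast : ((v.toNat : Int)) = v := Int.toNat_of_nonneg (by omega)
          have hdcast : ((den.toNat : Int)) = den := Int.toNat_of_nonneg (by omega)
          have hmodleft : jacobiSym (den % v) v.toNat = jacobiSym den v.toNat := by
            conv_rhs => rw [jacobiSym.mod_left den v.toNat]
            rw [hvcast]
          have hrecip : jacobiSym v den.toNat = qrSign den.toNat v.toNat * jacobiSym den v.toNat := by
            have := jacobiSym.quadratic_reciprocity' (a := v.toNat) (b := den.toNat)
              (Nat.odd_iff.mpr (by omega)) (Nat.odd_iff.mpr (by omega))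
            rwa [hvcast, hdcast] at this
          have hsign : qrSign den.toNat v.toNat =
              if v % 4 = 3 ∧ den % 4 = 3 then -1 else 1 := by
            rw [qrSign_val den.toNat v.toNat (by omega) (by omega)]
            by_cases hc : v % 4 = 3 ∧ den % 4 = 3
            · rw [if_pos (by omega), if_pos hc]
            · rw [if_neg (by omega), if_neg hc]
          rw [← g4, hmodleft]
          have hm4v : PySem.Int.mod v 4 = v % 4 := PySem.Int.mod_eq_emod_of_pos (by omega)
          have hm4d : PySem.Int.mod den 4 = den % 4 := PySem.Int.mod_eq_emod_of_pos (by omega)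
          by_cases hc : v % 4 = 3 ∧ den % 4 = 3
          · rw [if_pos (by rw [hm4v, hm4d]; exact hc)]
            have : jacobiSym v den.toNat = -jacobiSym den v.toNat := by
              rw [hrecip, hsign, if_pos hc]; ring
            rw [this]; try ring
          · rw [if_neg (by rw [hm4v, hm4d]; exact hc)]
            have : jacobiSym v den.toNat = jacobiSym den v.toNat := by
              rw [hrecip, hsign, if_neg hc, one_mul]
            rw [this]; try ring

theorem legendreB (n : Int) (q : Nat) [hF : Fact (Nat.Prime q)] (h2 : 2 < q) :
    legendre_symbol_alt n (q : Int) = legendreSym q n := by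
  have hqp : Nat.Prime q := hF.out
  have hodd : q % 2 = 1 := Nat.odd_iff.mp (hqp.odd_of_ne_two (by omega))
  have hq0 : (0 : Int) < (q : Int) := by exact_mod_cast Nat.lt_of_lt_of_le Nat.zero_lt_two (by omega)
  unfold legendre_symbol_alt
  have hmod : PySem.Int.mod n (q : Int) = n % (q : Int) := PySem.Int.mod_eq_emod_of_pos hq0
  rw [hmod]
  have h0 : 0 ≤ n % (q : Int) := Int.emod_nonneg _ (by omega)
  rw [jacobiLoop_spec _ _ _ _ h0 (by omega) (by exact_mod_cast Nat.lt_of_lt_of_le Nat.one_lt_two (by omega)) (by omega)]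
  rw [one_mul]
  have : jacobiSym (n % (q : Int)) (q : Int).toNat = jacobiSym n q := by
    rw [Int.toNat_natCast]
    conv_rhs => rw [jacobiSym.mod_left n q]
  rw [this, jacobiSym.legendreSym.to_jacobiSym]

theorem legendre_eq (n : Int) (q : Nat) (hq : Nat.Prime q) (h2 : 2 < q) :
    legendre_symbol n (q : Int) = legendre_symbol_alt n (q : Int) := by
  haveI : Fact (Nat.Prime q) := ⟨hq⟩
  rw [legendreA n q h2, legendreB n q h2]

-- ===== VERDICT (by name: the statement is the Claim_ definition above) =====

theorem generate_factor_base_spec : Claim_equal_generate_factor_base := by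
  intro n B _hDom hPre
  unfold Spec_generate_factor_base generate_factor_base generate_factor_base_alt
  have hfun : ∀ (fb : List Int) (p : Int),
      (if p = 2 then fb ++ [p] else if legendre_symbol n p = 1 then fb ++ [p] else fb) =
      (if p = 2 ∨ legendre_symbol n p = 1 then fb ++ [p] else fb) := by
    intro fb p; by_cases h2 : p = 2 <;> by_cases hl : legendre_symbol n p = 1 <;> simp [h2, hl]
  rw [PySem.List.foldl_congr_mem _ _ _ _ (fun acc x _ => hfun acc x)]
  rw [PySem.List.foldl_append_ite_eq_filter]
  have : (List.filter (fun x => decide (x = 2 ∨ legendre_symbol n x = 1)) (sieve_of_eratosthenes B)) =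
      (sieve_of_eratosthenes B).filter (fun p => p == 2 || legendre_symbol_alt n p == 1) := by
    apply List.filter_congr
    intro p hp
    obtain ⟨q, rfl, hq⟩ := sieve_mem_prime B hPre p hp
    by_cases h2 : (q : Int) = 2
    · simp [h2]
    · have hne : q ≠ 2 := fun h => h2 (by exact_mod_cast congrArg (fun t : Nat => (t : Int)) h)
      have hq2 : 2 < q := lt_of_le_of_ne hq.two_le (Ne.symm hne)
      have hlq := legendre_eq n q hq hq2
      have hb : ((q : Int) == 2) = false := by simpa using h2
      simp [hb, hlq, h2]
      rfl
  rw [this]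
  rfl
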